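-- pv_equiv track=rewrite | github.com/nictes1/automatizacion-ai | services/orchestrator_service.py | _get_next_slot_to_ask
-- ===== SOURCE A (Python) =====
-- from typing import Dict, List, Optional, Any, Tuple
--
-- def _get_next_slot_to_ask(vertical: str, missing_slots: List[str], current_slots: Dict[str, Any]) -> str:
--     """
--     Implementa política ONE-SLOT-PER-TURN: decide qué slot pedir según orden lógico.
--
--     Args:
--         vertical: Vertical del negocio (servicios, gastronomia, etc.)
--         missing_slots: Lista de slots que faltan
--         current_slots: Slots actuales ya completados
--
--     Returns:
--         El próximo slot a pedir según prioridad lógica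
--     """
--     # Orden de prioridad por vertical (según recomendaciones ChatGPT)
--     priority_order = {
--         "servicios": [
--             "service_type",      # 1. Qué servicio quiere (crítico para todo lo demás)
--             "preferred_date",    # 2. Cuándo (para chequear disponibilidad)
--             "preferred_time",    # 3. A qué hora (específico)
--             "client_name"        # 4. Nombre para confirmar
--         ],
--         "gastronomia": [
--             "categoria",         # 1. Tipo de comida
--             "items",            # 2. Platos específicos
--             "metodo_entrega"    # 3. Cómo lo quiere
--         ],
--         "inmobiliaria": [
--             "operation",        # 1. Compra/alquiler/venta
--             "type",            # 2. Casa/apartamento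
--             "zone"             # 3. Zona/barrio
--         ]
--     }
--
--     # Obtener orden para este vertical
--     order = priority_order.get(vertical, missing_slots)
--
--     # Encontrar el primer slot en el orden que esté faltando
--     for slot in order:
--         if slot in missing_slots:
--             return slot
--
--     # Fallback: si no encontramos nada en el orden, devolver el primero que falte
--     return missing_slots[0] if missing_slots else ""
-- ===== SOURCE B (Python) =====
-- from typing import Dict, List, Any
--
-- def _get_next_slot_to_ask(vertical: str, missing_slots: List[str], current_slots: Dict[str, Any]) -> str:
--     priority_order = {
--         "servicios": ["service_type", "preferred_date", "preferred_time", "client_name"],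
--         "gastronomia": ["categoria", "items", "metodo_entrega"],
--         "inmobiliaria": ["operation", "type", "zone"],
--     }
--     order = priority_order.get(vertical, missing_slots)
--
--     # index table: each slot -> position of its FIRST occurrence in the priority order
--     rank = {}
--     for i, slot in enumerate(order):
--         if slot not in rank:
--             rank[slot] = i
--
--     if not missing_slots:
--         return ""
--
--     # single pass over missing_slots, keeping the earliest slot of minimal rank
--     default = len(order)
--     best = missing_slots[0]
--     best_r = rank.get(best, default)
--     for slot in missing_slots[1:]:
--         r = rank.get(slot, default)
--         if r < best_r:
--             best, best_r = slot, r
--     return best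
-- ===== Notes on version B (the rewrite author's own statement) =====
-- stated objective: alternative
-- what changed: Instead of scanning the priority list and testing membership in missing_slots (then a separate fallback), B builds a first-occurrence rank table from the priority order once and makes a single pass over missing_slots returning the earliest slot of minimal rank, the empty-list fallback folded in.
import Mathlib
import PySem

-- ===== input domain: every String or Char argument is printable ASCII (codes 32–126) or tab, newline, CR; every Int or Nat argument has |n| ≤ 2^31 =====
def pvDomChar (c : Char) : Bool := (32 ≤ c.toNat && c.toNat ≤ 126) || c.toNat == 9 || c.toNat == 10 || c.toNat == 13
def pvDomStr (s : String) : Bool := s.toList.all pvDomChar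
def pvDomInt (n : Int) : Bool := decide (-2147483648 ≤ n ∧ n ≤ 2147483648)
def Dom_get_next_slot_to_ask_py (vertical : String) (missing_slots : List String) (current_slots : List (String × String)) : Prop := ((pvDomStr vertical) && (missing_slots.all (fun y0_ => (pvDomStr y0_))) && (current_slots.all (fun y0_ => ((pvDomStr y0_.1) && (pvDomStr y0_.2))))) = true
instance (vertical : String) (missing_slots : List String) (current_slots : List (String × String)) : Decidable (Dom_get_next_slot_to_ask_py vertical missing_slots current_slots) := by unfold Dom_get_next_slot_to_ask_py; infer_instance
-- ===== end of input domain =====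

-- B replaces A's scan of the priority list (membership-tested against missing_slots, plus a
-- separate fallback) by a first-occurrence rank table of the priority order and one minimising
-- pass over missing_slots; objective: alternative decomposition, same cost class.

-- ===== PORT A =====
-- A's loop: 'for slot in order: if slot in missing_slots: return slot'
def pvA_find : List String → List String → Option String
  | [], _ => none
  | slot :: rest, missing => if missing.contains slot then some slot else pvA_find rest missing

def get_next_slot_to_ask_py (vertical : String) (missing_slots : List String) (current_slots : List (String × String)) : String :=
  let priority_order : PySem.Dict String (List String) := PySem.Dict.ofList
    [("servicios", ["service_type", "preferred_date", "preferred_time", "client_name"]),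
     ("gastronomia", ["categoria", "items", "metodo_entrega"]),
     ("inmobiliaria", ["operation", "type", "zone"])]
  let order := priority_order.getD vertical missing_slots
  match pvA_find order missing_slots with
  | some slot => slot
  | none => match missing_slots with
    | [] => ""
    | s :: _ => s

-- ===== PORT B =====
-- 'rank = {}; for i, slot in enumerate(order): if slot not in rank: rank[slot] = i'
def pvB_rank (order : List String) : PySem.Dict String Int :=
  (PySem.List.enumerate order 0).foldl
    (fun rank p => if (rank.get? p.2).isNone then rank.insert p.2 p.1 else rank)
    PySem.Dict.empty

-- 'for slot in missing_slots[1:]: r = rank.get(slot, default); if r < best_r: best, best_r = slot, r'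
def pvB_minLoop (rank : PySem.Dict String Int) (dflt : Int) : String → Int → List String → String
  | best, _, [] => best
  | best, bestR, slot :: rest =>
    let r := rank.getD slot dflt
    if r < bestR then pvB_minLoop rank dflt slot r rest
    else pvB_minLoop rank dflt best bestR rest

def get_next_slot_to_ask_py_alt (vertical : String) (missing_slots : List String) (current_slots : List (String × String)) : String :=
  let priority_order : PySem.Dict String (List String) := PySem.Dict.ofList
    [("servicios", ["service_type", "preferred_date", "preferred_time", "client_name"]),
     ("gastronomia", ["categoria", "items", "metodo_entrega"]),
     ("inmobiliaria", ["operation", "type", "zone"])]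
  let order := priority_order.getD vertical missing_slots
  let rank := pvB_rank order
  match missing_slots with
  | [] => ""
  | best :: rest => pvB_minLoop rank (order.length : Int) best (rank.getD best (order.length : Int)) rest

-- ===== PRECONDITION & SPEC =====
def Spec_get_next_slot_to_ask_py (vertical : String) (missing_slots : List String) (current_slots : List (String × String)) (out : String) : Prop := out = get_next_slot_to_ask_py_alt vertical missing_slots current_slots
instance (vertical : String) (missing_slots : List String) (current_slots : List (String × String)) (out : String) : Decidable (Spec_get_next_slot_to_ask_py vertical missing_slots current_slots out) := by unfold Spec_get_next_slot_to_ask_py; infer_instance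

-- ===== CLAIM (what is proved, stated in full; the proofs are below) =====
def Claim_equal_get_next_slot_to_ask_py : Prop := ∀ (vertical : String) (missing_slots : List String) (current_slots : List (String × String)), Dom_get_next_slot_to_ask_py vertical missing_slots current_slots → Spec_get_next_slot_to_ask_py vertical missing_slots current_slots (get_next_slot_to_ask_py vertical missing_slots current_slots)

-- ===== LEMMAS AND PROOFS =====

-- A's loop found nothing: no element of order is in missing
theorem pvA_find_none {order missing : List String} (h : pvA_find order missing = none) :
    ∀ x ∈ order, x ∉ missing := by
  induction order with
  | nil => simp
  | cons y rest ih =>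
    simp only [pvA_find] at h
    by_cases hy : missing.contains y
    · have hym : y ∈ missing := by simpa using hy
      simp [hym] at h
    · simp only [hy, Bool.false_eq_true, if_false] at h
      intro x hx
      rcases List.mem_cons.mp hx with rfl | hx'
      · simpa using hy
      · exact ih h x hx'

-- A's loop found s: s ∈ missing, s ∈ order, and s has minimal idxOf among missing ∩ order
theorem pvA_find_some {order missing : List String} {s : String}
    (h : pvA_find order missing = some s) :
    s ∈ missing ∧ s ∈ order ∧ ∀ x ∈ missing, x ∈ order → order.idxOf s ≤ order.idxOf x := by
  induction order with
  | nil => simp [pvA_find] at h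
  | cons y rest ih =>
    simp only [pvA_find] at h
    by_cases hy : missing.contains y
    · simp only [hy, if_true, Option.some.injEq] at h
      subst h
      exact ⟨by simpa using hy, by simp, fun x _ _ => by simp [List.idxOf_cons_self]⟩
    · simp only [hy, Bool.false_eq_true, if_false] at h
      obtain ⟨hm, ho, hmin⟩ := ih h
      have hyn : y ∉ missing := by simpa using hy
      have hsy : s ≠ y := fun e => hyn (e ▸ hm)
      refine ⟨hm, List.mem_cons_of_mem _ ho, ?_⟩
      intro x hx hxo
      have hxy : x ≠ y := fun e => hyn (e ▸ hx)
      rcases List.mem_cons.mp hxo with rfl | hxo'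
      · exact absurd rfl hxy
      · rw [List.idxOf_cons_ne _ (Ne.symm hsy), List.idxOf_cons_ne _ (Ne.symm hxy)]
        exact Nat.succ_le_succ (hmin x hx hxo')

-- the rank-building fold: get? of the result, for any start index and accumulator
theorem pvB_rank_go_get? (l : List String) (i : Int) (d : PySem.Dict String Int) (s : String) :
    ((PySem.List.enumerate l i).foldl
      (fun rank p => if (rank.get? p.2).isNone then rank.insert p.2 p.1 else rank) d).get? s
    = (d.get? s).or (if s ∈ l then some (i + (l.idxOf s : Int)) else none) := by
  induction l generalizing i d with
  | nil => simp [PySem.List.enumerate_nil]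
  | cons x xs ih =>
    rw [PySem.List.enumerate_cons, List.foldl_cons]
    by_cases hx : (d.get? x).isNone
    · have hdx : d.get? x = none := Option.isNone_iff_eq_none.mp hx
      simp only [hx, if_true]
      rw [ih]
      by_cases hsx : s = x
      · subst hsx
        rw [PySem.Dict.get?_insert_self, hdx]
        simp [List.idxOf_cons_self]
      · rw [PySem.Dict.get?_insert_of_ne _ _ hsx]
        have hmem : (s ∈ x :: xs) ↔ (s ∈ xs) := by simp [List.mem_cons, hsx]
        simp only [hmem]
        congr 1
        split_ifs with h
        · rw [List.idxOf_cons_ne _ (Ne.symm hsx)]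
          congr 1
          push_cast
          ring
        · rfl
    · rw [if_neg hx]
      rw [ih]
      by_cases hsx : s = x
      · subst hsx
        cases hdx : d.get? s with
        | none => rw [hdx] at hx; simp at hx
        | some v => simp [hdx]
      · have hmem : (s ∈ x :: xs) ↔ (s ∈ xs) := by simp [List.mem_cons, hsx]
        simp only [hmem]
        congr 1
        split_ifs with h
        · rw [List.idxOf_cons_ne _ (Ne.symm hsx)]
          congr 1
          push_cast
          ring
        · rfl

-- the rank table looked up with default len(order) is exactly idxOf
theorem pvB_rank_getD (order : List String) (s : String) :
    (pvB_rank order).getD s (order.length : Int) = (order.idxOf s : Int) := by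
  rw [PySem.Dict.getD_eq_get?_getD, pvB_rank, pvB_rank_go_get?]
  by_cases h : s ∈ order
  · simp [PySem.Dict.get?_empty, h]
  · simp [PySem.Dict.get?_empty, h, List.idxOf_eq_length h]

-- the min loop returns an element of best :: rest
theorem pvB_minLoop_mem (rank : PySem.Dict String Int) (dflt : Int) :
    ∀ (xs : List String) (b : String) (r : Int), pvB_minLoop rank dflt b r xs ∈ b :: xs := by
  intro xs
  induction xs with
  | nil => intro b r; simp [pvB_minLoop]
  | cons y ys ih =>
    intro b r
    simp only [pvB_minLoop]
    split_ifs with h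
    · have := ih y (rank.getD y dflt)
      rcases List.mem_cons.mp this with e | e
      · simp [e]
      · simp [List.mem_cons, e]
    · have := ih b r
      rcases List.mem_cons.mp this with e | e
      · simp [e]
      · simp [List.mem_cons, e]

-- if nothing beats the running best strictly, the loop keeps it
theorem pvB_minLoop_stay (rank : PySem.Dict String Int) (dflt : Int) :
    ∀ (xs : List String) (b : String) (r : Int),
      (∀ x ∈ xs, ¬ rank.getD x dflt < r) → pvB_minLoop rank dflt b r xs = b := by
  intro xs
  induction xs with
  | nil => intro b r _; simp [pvB_minLoop]
  | cons y ys ih =>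
    intro b r h
    simp only [pvB_minLoop]
    rw [if_neg (h y (by simp))]
    exact ih b r (fun x hx => h x (by simp [hx]))

-- the result's key is ≤ every key in best :: rest (when the carried key is best's key)
theorem pvB_minLoop_le (rank : PySem.Dict String Int) (dflt : Int) :
    ∀ (xs : List String) (b : String) (r : Int), r = rank.getD b dflt →
      ∀ x ∈ b :: xs, rank.getD (pvB_minLoop rank dflt b r xs) dflt ≤ rank.getD x dflt := by
  intro xs
  induction xs with
  | nil =>
    intro b r hr x hx
    rcases List.mem_cons.mp hx with rfl | e
    · simp [pvB_minLoop]
    · simp at e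
  | cons y ys ih =>
    intro b r hr x hx
    simp only [pvB_minLoop]
    split_ifs with h
    · have hres := ih y (rank.getD y dflt) rfl
      rcases List.mem_cons.mp hx with rfl | hx'
      · exact le_of_lt (lt_of_le_of_lt (hres y (by simp)) (hr ▸ h))
      · exact hres x hx'
    · have hres := ih b r hr
      rcases List.mem_cons.mp hx with rfl | hx'
      · exact hres x (by simp)
      · rcases List.mem_cons.mp hx' with rfl | hx'' 
        · rw [hr] at h
          exact le_trans (hres b (by simp)) (not_lt.mp h)
        · exact hres x (by simp [hx''])

-- the shared core, abstracted over the chosen priority order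
theorem pv_core_eq (order missing : List String) :
    (match pvA_find order missing with
     | some slot => slot
     | none => match missing with | [] => "" | s :: _ => s)
    = (match missing with
       | [] => ""
       | best :: rest =>
         pvB_minLoop (pvB_rank order) (order.length : Int) best
           ((pvB_rank order).getD best (order.length : Int)) rest) := by
  cases hfind : pvA_find order missing with
  | none =>
    cases missing with
    | nil => rfl
    | cons m rest =>
      have hnone := pvA_find_none hfind
      have : ∀ x ∈ m :: rest, x ∉ order := fun x hx ho => hnone x ho hx
      simp only
      rw [pvB_minLoop_stay]
      intro x hx
      rw [pvB_rank_getD, pvB_rank_getD,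
        List.idxOf_eq_length (this x (by simp [hx])), List.idxOf_eq_length (this m (by simp))]
      simp
  | some s =>
    obtain ⟨hm, ho, hmin⟩ := pvA_find_some hfind
    cases missing with
    | nil => simp at hm
    | cons m rest =>
      simp only
      set res := pvB_minLoop (pvB_rank order) (order.length : Int) m
        ((pvB_rank order).getD m (order.length : Int)) rest with hres
      have hmem : res ∈ m :: rest := pvB_minLoop_mem _ _ _ _ _
      have hle : ∀ x ∈ m :: rest, (pvB_rank order).getD res (order.length : Int)
          ≤ (pvB_rank order).getD x (order.length : Int) := pvB_minLoop_le _ _ _ _ _ rfl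
      -- every missing slot has key ≥ idxOf s
      have hlow : ∀ x ∈ m :: rest, (order.idxOf s : Int) ≤ (order.idxOf x : Int) := by
        intro x hx
        by_cases hxo : x ∈ order
        · exact_mod_cast hmin x hx hxo
        · rw [List.idxOf_eq_length hxo]
          exact_mod_cast Nat.le_of_lt (List.idxOf_lt_length_of_mem ho)
      -- the result's key equals idxOf s
      have hkey : (order.idxOf res : Int) = (order.idxOf s : Int) := by
        have h1 : (order.idxOf res : Int) ≤ (order.idxOf s : Int) := by
          have := hle s hm
          rwa [pvB_rank_getD, pvB_rank_getD] at this
        exact le_antisymm h1 (hlow res hmem)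
      -- hence the result IS s
      have hkn : order.idxOf res = order.idxOf s := by exact_mod_cast hkey
      have hreso : res ∈ order := by
        by_contra hro
        have := List.idxOf_eq_length hro
        rw [this] at hkn
        exact absurd (hkn ▸ List.idxOf_lt_length_of_mem ho) (lt_irrefl _)
      have : res = s := by
        have e1 := List.getElem_idxOf (List.idxOf_lt_length_of_mem hreso)
        have e2 := List.getElem_idxOf (List.idxOf_lt_length_of_mem ho)
        rw [← e1, ← e2]
        simp [hkn]
      exact this.symm

-- ===== VERDICT (by name: the statement is the Claim_ definition above) =====
theorem get_next_slot_to_ask_py_spec : Claim_equal_get_next_slot_to_ask_py := by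
  intro vertical missing_slots current_slots _
  unfold Spec_get_next_slot_to_ask_py get_next_slot_to_ask_py get_next_slot_to_ask_py_alt
  exact pv_core_eq _ missing_slots
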